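-- pv_equiv track=rewrite | github.com/traja-team/traja | traja/dataset/generator.py | get_indices_from_categories
-- ===== SOURCE A (Python) =====
-- def get_indices_from_categories(categories: list, sequences_in_categories: list):
--     indices = list()
--     sequence_index = 0
--     start_index = 0
--     for category in categories:
--         while sequence_index < len(sequences_in_categories) and sequence_index < category:
--             start_index += sequences_in_categories[sequence_index]
--             sequence_index += 1
--         if sequence_index >= len(sequences_in_categories):
--             break
--         if sequence_index == category:
--             indices += list(range(start_index, start_index + sequences_in_categories[sequence_index]))
--         start_index += sequences_in_categories[sequence_index]
--         sequence_index += 1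
--     return indices
-- ===== SOURCE B (Python) =====
-- def get_indices_from_categories(categories: list, sequences_in_categories: list):
--     # Precompute prefix sums once; then a single pass over categories with pure index arithmetic.
--     n = len(sequences_in_categories)
--     prefix = [0]
--     acc = 0
--     for x in sequences_in_categories:
--         acc += x
--         prefix.append(acc)
--     indices = []
--     si = 0
--     for category in categories:
--         if si < category:
--             si = category
--         if si >= n:
--             break
--         if si == category:
--             indices.extend(range(prefix[si], prefix[si + 1]))
--         si += 1
--     return indices
-- ===== Notes on version B (the rewrite author's own statement) =====
-- stated objective: simpler
-- what changed: Replaced A's running start_index and inner accumulating while-loop with a prefix-sum table computed once, so the category pass only does index arithmetic and table lookups.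
import Mathlib
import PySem

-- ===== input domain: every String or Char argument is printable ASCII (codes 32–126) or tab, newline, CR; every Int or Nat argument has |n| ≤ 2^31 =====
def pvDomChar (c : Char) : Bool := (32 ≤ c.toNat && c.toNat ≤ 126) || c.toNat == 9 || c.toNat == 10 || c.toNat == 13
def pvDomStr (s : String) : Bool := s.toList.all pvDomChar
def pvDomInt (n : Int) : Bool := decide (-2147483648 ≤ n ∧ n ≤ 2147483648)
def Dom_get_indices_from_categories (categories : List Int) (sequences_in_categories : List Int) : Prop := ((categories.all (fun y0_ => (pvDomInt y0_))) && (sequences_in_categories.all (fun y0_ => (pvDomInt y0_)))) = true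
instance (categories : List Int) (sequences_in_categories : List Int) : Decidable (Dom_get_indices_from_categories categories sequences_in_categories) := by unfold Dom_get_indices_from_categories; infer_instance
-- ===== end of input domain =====

-- B replaces A's running start_index and inner accumulating while-loop by a precomputed
-- prefix-sum table plus direct index arithmetic (objective: simpler; same O(|cats|+|seqs|) cost).

-- ===== PORT A =====
-- the inner `while sequence_index < len(...) and sequence_index < category` loop;
-- fuel = seqs.length suffices because sequence_index stays ≥ 0 and increments each step
def pvWhileA (seqs : List Int) (c : Int) : Nat → Int → Int → Int × Int
  | 0, si, st => (si, st)
  | fuel + 1, si, st =>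
    if si < (seqs.length : Int) ∧ si < c then
      pvWhileA seqs c fuel (si + 1) (st + PySem.List.pyGetD seqs si 0)
    else (si, st)

def pvLoopA (seqs : List Int) : List Int → List Int → Int → Int → List Int
  | [], ind, _, _ => ind
  | c :: cs, ind, si, st =>
    let p := pvWhileA seqs c seqs.length si st
    if p.1 ≥ (seqs.length : Int) then ind
    else
      let v := PySem.List.pyGetD seqs p.1 0
      let ind' := if p.1 = c then ind ++ PySem.List.pyRange p.2 (p.2 + v) 1 else ind
      pvLoopA seqs cs ind' (p.1 + 1) (p.2 + v)

def get_indices_from_categories (categories : List Int) (sequences_in_categories : List Int) : List Int :=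
  pvLoopA sequences_in_categories categories [] 0 0

-- ===== PORT B =====
def pvPrefixB (seqs : List Int) : List Int × Int :=
  seqs.foldl (fun pa x => (pa.1 ++ [pa.2 + x], pa.2 + x)) ([0], 0)

def pvLoopB (pre : List Int) (n : Int) : List Int → List Int → Int → List Int
  | [], ind, _ => ind
  | c :: cs, ind, si =>
    let si' := if si < c then c else si
    if si' ≥ n then ind
    else
      let ind' := if si' = c then
          ind ++ PySem.List.pyRange (PySem.List.pyGetD pre si' 0) (PySem.List.pyGetD pre (si' + 1) 0) 1
        else ind
      pvLoopB pre n cs ind' (si' + 1)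

def get_indices_from_categories_alt (categories : List Int) (sequences_in_categories : List Int) : List Int :=
  pvLoopB (pvPrefixB sequences_in_categories).1 (sequences_in_categories.length : Int) categories [] 0

-- ===== PRECONDITION & SPEC =====
def Spec_get_indices_from_categories (categories : List Int) (sequences_in_categories : List Int) (out : List Int) : Prop := out = get_indices_from_categories_alt categories sequences_in_categories
instance (categories : List Int) (sequences_in_categories : List Int) (out : List Int) : Decidable (Spec_get_indices_from_categories categories sequences_in_categories out) := by unfold Spec_get_indices_from_categories; infer_instance

-- ===== CLAIM (what is proved, stated in full; the proofs are below) =====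
def Claim_equal_get_indices_from_categories : Prop := ∀ (categories : List Int) (sequences_in_categories : List Int), Dom_get_indices_from_categories categories sequences_in_categories → Spec_get_indices_from_categories categories sequences_in_categories (get_indices_from_categories categories sequences_in_categories)

-- ===== LEMMAS AND PROOFS =====

-- prefix sum of the first k elements
def pvS (seqs : List Int) (k : Nat) : Int := (seqs.take k).sum

lemma pvPrefixB_foldl (xs : List Int) : ∀ (p : List Int) (a : Int),
    xs.foldl (fun pa x => (pa.1 ++ [pa.2 + x], pa.2 + x)) (p, a)
      = (p ++ (List.range xs.length).map (fun i => a + (xs.take (i + 1)).sum), a + xs.sum) := by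
  induction xs with
  | nil => simp
  | cons x xs ih =>
    intro p a
    simp only [List.foldl_cons, ih, List.length_cons, List.range_succ_eq_map]
    simp [List.map_map, Function.comp_def, List.append_assoc, add_assoc]

lemma pvPrefixB_get (seqs : List Int) (k : Nat) (hk : k ≤ seqs.length) :
    ((pvPrefixB seqs).1).getD k 0 = pvS seqs k := by
  unfold pvPrefixB pvS
  rw [pvPrefixB_foldl]
  match k with
  | 0 => simp
  | k + 1 =>
    have hk' : k < seqs.length := by omega
    have : (([0] : List Int) ++ (List.range seqs.length).map (fun i => 0 + (seqs.take (i + 1)).sum)).getD (k + 1) 0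
        = ((List.range seqs.length).map (fun i => 0 + (seqs.take (i + 1)).sum)).getD k 0 := by
      simp [List.getD]
    rw [this]
    rw [List.getD_eq_getElem _ _ (by simpa using hk')]
    simp

lemma pvS_succ (seqs : List Int) (k : Nat) (hk : k < seqs.length) :
    pvS seqs (k + 1) = pvS seqs k + seqs[k] := by
  unfold pvS
  rw [List.take_add_one]
  simp [hk]

-- characterisation of the inner while loop of A
lemma pvWhileA_spec (seqs : List Int) (c : Int) :
    ∀ (fuel : Nat) (si : Int), 0 ≤ si → si ≤ (seqs.length : Int) →
      (min c (seqs.length : Int)).toNat ≤ si.toNat + fuel →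
      pvWhileA seqs c fuel si (pvS seqs si.toNat)
        = (max si (min c (seqs.length : Int)), pvS seqs (max si (min c (seqs.length : Int))).toNat) := by
  intro fuel
  induction fuel with
  | zero =>
    intro si h0 hn hf
    unfold pvWhileA
    have hguard : ¬ (si < (seqs.length : Int) ∧ si < c) := by
      rintro ⟨h1, h2⟩
      have : si < min c (seqs.length : Int) := by omega
      omega
    have hmax : max si (min c (seqs.length : Int)) = si := by omega
    simp [hmax]
  | succ fuel ih =>
    intro si h0 hn hf
    unfold pvWhileA
    by_cases hguard : si < (seqs.length : Int) ∧ si < c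
    · have h1 := hguard.1
      have h2 := hguard.2
      have hlt : si.toNat < seqs.length := by omega
      have hget : PySem.List.pyGetD seqs si 0 = seqs[si.toNat] := by
        rw [PySem.List.pyGetD_of_nonneg _ _ h0, List.getD_eq_getElem _ _ hlt]
      have hstep : pvS seqs si.toNat + PySem.List.pyGetD seqs si 0 = pvS seqs (si + 1).toNat := by
        rw [hget, ← pvS_succ seqs si.toNat hlt]
        congr 1
        omega
      have hmax : max (si + 1) (min c (seqs.length : Int)) = max si (min c (seqs.length : Int)) := by omega
      rw [if_pos hguard, hstep, ih (si + 1) (by omega) (by omega) (by omega), hmax]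
    · have hge : min c (seqs.length : Int) ≤ si := by omega
      have hmax : max si (min c (seqs.length : Int)) = si := by omega
      simp [hguard, hmax]

-- the two outer loops agree under the invariant st = prefix sum up to si
lemma pvLoop_eq (seqs : List Int) :
    ∀ (cs ind : List Int) (si : Int), 0 ≤ si → si ≤ (seqs.length : Int) →
      pvLoopA seqs cs ind si (pvS seqs si.toNat)
        = pvLoopB (pvPrefixB seqs).1 (seqs.length : Int) cs ind si := by
  intro cs
  induction cs with
  | nil => intro ind si _ _; rfl
  | cons c cs ih =>
    intro ind si h0 hn
    unfold pvLoopA pvLoopB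
    rw [pvWhileA_spec seqs c seqs.length si h0 hn (by omega)]
    set m := min c (seqs.length : Int) with hm
    set siA := max si m with hsiA
    have hsiA0 : 0 ≤ siA := by omega
    -- B's advanced index
    have hBsi : (if si < c then c else si) = max si c := by omega
    rw [hBsi]
    by_cases hbr : siA ≥ (seqs.length : Int)
    · -- both break
      have : max si c ≥ (seqs.length : Int) := by omega
      simp [hbr, this]
    · -- neither breaks; siA = max si c and < length
      have hlt : siA < (seqs.length : Int) := by omega
      have heq : max si c = siA := by omega
      have hnbr : ¬ (max si c ≥ (seqs.length : Int)) := by omega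
      simp only [hbr, if_neg, hnbr, heq]
      have hltN : siA.toNat < seqs.length := by omega
      have hget : PySem.List.pyGetD seqs siA 0 = seqs[siA.toNat] := by
        rw [PySem.List.pyGetD_of_nonneg _ _ hsiA0, List.getD_eq_getElem _ _ hltN]
      have hpre1 : PySem.List.pyGetD (pvPrefixB seqs).1 siA 0 = pvS seqs siA.toNat := by
        rw [PySem.List.pyGetD_of_nonneg _ _ hsiA0, pvPrefixB_get seqs siA.toNat (by omega)]
      have hpre2 : PySem.List.pyGetD (pvPrefixB seqs).1 (siA + 1) 0 = pvS seqs siA.toNat + seqs[siA.toNat] := by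
        rw [PySem.List.pyGetD_of_nonneg _ _ (by omega), pvPrefixB_get seqs (siA + 1).toNat (by omega)]
        have : (siA + 1).toNat = siA.toNat + 1 := by omega
        rw [this, pvS_succ seqs siA.toNat hltN]
      have hnext : pvS seqs siA.toNat + seqs[siA.toNat] = pvS seqs (siA + 1).toNat := by
        rw [← pvS_succ seqs siA.toNat hltN]; congr 1; omega
      rw [hpre1, hpre2, hget]
      rw [show pvS seqs siA.toNat + seqs[siA.toNat] = pvS seqs (siA + 1).toNat from hnext]
      exact ih _ (siA + 1) (by omega) (by omega)

-- ===== VERDICT (by name: the statement is the Claim_ definition above) =====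
theorem get_indices_from_categories_spec : Claim_equal_get_indices_from_categories := by
  intro categories seqs _
  unfold Spec_get_indices_from_categories get_indices_from_categories get_indices_from_categories_alt
  have := pvLoop_eq seqs categories [] 0 le_rfl (by positivity)
  simpa [pvS] using this
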